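-- pv_equiv track=rewrite | github.com/iamsanjaymalakar/cf-rlc | compare.py | extract_errors_and_count_v5
-- ===== SOURCE A (Python) =====
-- def extract_errors_and_count_v5(error_text: str, project_name=""):
--     # Replace old and new start paths with a standardized start path
--     standardized_start_path = "../dataset"
--     error_text = error_text.replace(
--         "../../../../datasets", standardized_start_path)
--     # Split the error text into lines
--     lines = error_text.split("\n")
--
--     # Initialize a list to hold extracted errors and a counter for the errors
--     errors = []
--     error_count = 0
--     reported_error_count = None
--
--     # Define a general pattern to match the start of errors
--     error_start_patterns = ["../dataset/",
--                             "../../../../datasets/june2020_dataset/"]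
--
--     # Loop through lines to find and extract errors and check for the total error count line
--     current_error = []
--     exception_errors = 0
--     for line in lines:
--         # Skip if the line is a "Note:" line or contains a warning
--         if line.strip().startswith("Note:") or "warning:" in line:
--             continue
--         if line.startswith("error: "):
--             exception_errors += 1
--         # Check for the total error count line
--         if line.strip().endswith(" errors"):
--             reported_error_count = int(line.strip().split(" ")[0])
--             continue  # Skip adding this line to any current error
--
--         # Check if line starts with any of the specified patterns indicating a new error
--         if any(line.startswith(pattern) for pattern in error_start_patterns):
--             if current_error:  # If there is a current error being processed, add it to errors
--                 errors.append("\n".join(current_error))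
--                 current_error = []  # Reset current error
--             current_error.append(line)
--             error_count += 1  # Increment error count since this line indicates a new error
--         elif current_error:  # If we are in the middle of an error, add the line to the current error
--             current_error.append(line)
--
--     # Check if there's an error being processed when the loop ends
--     if current_error:
--         errors.append("\n".join(current_error))
--
--     # Assert the error count matches the reported error count, if present
--     assert reported_error_count is None or reported_error_count - exception_errors == error_count, \
--         f"Error count mismatch: extracted count is {error_count}, but reported count is {reported_error_count}, {project_name}, {errors}"
--
--     return errors, error_count
-- ===== SOURCE B (Python) =====
-- def extract_errors_and_count_v5(error_text: str, project_name=""):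
--     # B: classify lines in one pass, then assemble the blocks back-to-front
--     # (each start line closes the block it begins), instead of A's flush-on-start
--     # forward accumulation.
--     lines = error_text.replace("../../../../datasets", "../dataset").split("\n")
--     start_patterns = ("../dataset/", "../../../../datasets/june2020_dataset/")
--
--     kept = []  # (starts_new_error, line) for every line that may belong to a block
--     exception_errors = 0
--     reported_error_count = None
--     for line in lines:
--         stripped = line.strip()
--         if stripped.startswith("Note:") or "warning:" in line:
--             continue
--         if line.startswith("error: "):
--             exception_errors += 1
--         if stripped.endswith(" errors"):
--             reported_error_count = int(stripped.split(" ")[0])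
--             continue
--         kept.append((line.startswith(start_patterns), line))
--
--     # Walk backwards: every line joins the current (rightmost open) block, and a
--     # start line completes it; lines before the first start are discarded.
--     errors = []
--     current = []
--     for is_start, line in reversed(kept):
--         current = [line] + current
--         if is_start:
--             errors = ["\n".join(current)] + errors
--             current = []
--
--     error_count = len(errors)
--     assert reported_error_count is None or reported_error_count - exception_errors == error_count, \
--         f"Error count mismatch: extracted count is {error_count}, but reported count is {reported_error_count}, {project_name}, {errors}"
--     return errors, error_count
-- ===== Notes on version B (the rewrite author's own statement) =====
-- stated objective: alternative
-- what changed: B separates classification from assembly: one pass tags each surviving line as start/continuation (while counting 'error: ' lines and capturing the reported count), then a backward pass builds each block by prepending lines until its start line closes it, instead of A's forward loop that flushes the in-progress block whenever a new start line appears.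
import Mathlib
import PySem

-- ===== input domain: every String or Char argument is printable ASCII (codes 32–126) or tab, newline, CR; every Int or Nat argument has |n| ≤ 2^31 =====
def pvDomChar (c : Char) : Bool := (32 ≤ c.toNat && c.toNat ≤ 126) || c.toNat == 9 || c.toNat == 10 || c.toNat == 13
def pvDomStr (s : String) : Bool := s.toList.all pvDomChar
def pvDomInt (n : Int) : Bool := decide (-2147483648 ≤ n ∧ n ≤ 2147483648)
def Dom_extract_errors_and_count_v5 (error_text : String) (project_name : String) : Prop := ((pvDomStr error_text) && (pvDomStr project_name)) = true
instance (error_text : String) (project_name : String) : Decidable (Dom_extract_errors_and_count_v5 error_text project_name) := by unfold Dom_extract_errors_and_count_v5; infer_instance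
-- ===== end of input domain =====

-- B replaces A's forward flush-on-start block accumulation by a classify pass plus a
-- backward assembly pass (each start line closes the block it begins); same cost, different structure.

-- shared line classifiers (both Pythons test exactly these conditions, in this order)
def pvDrop (l : String) : Bool :=
  PySem.Str.startswith (PySem.Str.strip l) "Note:" || PySem.Str.isIn "warning:" l
def pvCnt (l : String) : Bool := PySem.Str.endswith (PySem.Str.strip l) " errors"
def pvErr (l : String) : Bool := PySem.Str.startswith l "error: "
def pvStartPatterns : List String := ["../dataset/", "../../../../datasets/june2020_dataset/"]
def pvStart (l : String) : Bool := pvStartPatterns.any (fun p => PySem.Str.startswith l p)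
def pvTok (l : String) : String := ((PySem.Str.split? (PySem.Str.strip l) " ").getD []).headD ""
def pvLines (error_text : String) : List String :=
  (PySem.Str.split? (PySem.Str.replace error_text "../../../../datasets" "../dataset") "\n").getD []  -- sep "\n" ≠ "", so split? is always some

-- ===== PORT A =====
-- loop state: (errors, error_count, reported_error_count, current_error, exception_errors, raised)
-- `raised` records Python's ValueError from int(...); outside Pre_ only.
def pvStepA (st : List String × Int × Option Int × List String × Int × Bool) (line : String) :
    List String × Int × Option Int × List String × Int × Bool :=
  let (errors, error_count, reported, current, exc, bad) := st
  if pvDrop line then st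
  else
    let exc := if pvErr line then exc + 1 else exc
    if pvCnt line then
      match PySem.Int.ofStr? (pvTok line) with
      | some n => (errors, error_count, some n, current, exc, bad)
      | none   => (errors, error_count, reported, current, exc, true)  -- int() raises ValueError
    else if pvStart line then
      ((if current.isEmpty then errors else errors ++ [PySem.Str.join "\n" current]),
       error_count + 1, reported, [line], exc, bad)
    else if !current.isEmpty then (errors, error_count, reported, current ++ [line], exc, bad)
    else (errors, error_count, reported, current, exc, bad)

def extract_errors_and_count_v5 (error_text : String) (project_name : String) : List String × Int :=
  let st := (pvLines error_text).foldl pvStepA ([], 0, none, [], 0, false)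
  let (errors, error_count, reported, current, exc, bad) := st
  let errors := if current.isEmpty then errors else errors ++ [PySem.Str.join "\n" current]
  if bad then ([], 0)  -- ValueError was raised mid-loop; outside Pre_
  else
    match reported with
    | some n => if n - exc = error_count then (errors, error_count) else ([], 0)  -- AssertionError; outside Pre_
    | none => (errors, error_count)

-- ===== PORT B =====
-- pass 1 state: (kept tagged lines, exception_errors, reported_error_count, raised)
def pvStepB1 (st : List (Bool × String) × Int × Option Int × Bool) (line : String) :
    List (Bool × String) × Int × Option Int × Bool :=
  let (kept, exc, rep, bad) := st
  if pvDrop line then st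
  else
    let exc := if pvErr line then exc + 1 else exc
    if pvCnt line then
      match PySem.Int.ofStr? (pvTok line) with
      | some n => (kept, exc, some n, bad)
      | none   => (kept, exc, rep, true)  -- int() raises ValueError
    else (kept ++ [(pvStart line, line)], exc, rep, bad)

-- pass 2 step: prepend the line to the current block; a start line closes the block
def pvStepB2 (st : List String × List String) (pr : Bool × String) : List String × List String :=
  let current := pr.2 :: st.2
  if pr.1 then ((PySem.Str.join "\n" current) :: st.1, []) else (st.1, current)

def extract_errors_and_count_v5_alt (error_text : String) (project_name : String) : List String × Int :=
  let p1 := (pvLines error_text).foldl pvStepB1 ([], 0, none, false)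
  let (kept, exc, rep, bad) := p1
  let p2 := kept.reverse.foldl pvStepB2 ([], [])
  let errors := p2.1
  let error_count : Int := errors.length
  if bad then ([], 0)  -- ValueError; outside Pre_
  else
    match rep with
    | some n => if n - exc = error_count then (errors, error_count) else ([], 0)  -- AssertionError; outside Pre_
    | none => (errors, error_count)

-- ===== PRECONDITION & SPEC =====
-- closed-form input facts Pre_ is phrased with: which lines are count lines, the last
-- reported number, and the counts of 'error: ' lines and of block-start lines
def pvIsCntLine (l : String) : Bool := !pvDrop l && pvCnt l
def pvKept (lines : List String) : List String := lines.filter (fun l => !pvDrop l && !pvCnt l)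
def pvCntOf (p : String → Bool) : List String → Int
  | [] => 0
  | l :: k => (if p l then 1 else 0) + pvCntOf p k
-- the value reported by the LAST surviving count line (A overwrites on each one)
def pvRep (rep : Option Int) : List String → Option Int
  | [] => rep
  | l :: k =>
    if pvIsCntLine l then
      pvRep (match PySem.Int.ofStr? (pvTok l) with | some n => some n | none => rep) k
    else pvRep rep k

-- Pre_ excludes exactly the inputs on which Python A RAISES: a surviving count line
-- (stripped form ends in " errors") whose first token is not an int literal (ValueError
-- from int()), or a last reported count that differs from start-lines minus 'error: '
-- lines (AssertionError); B raises identically there. All inputs A returns on satisfy Pre_.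
def Pre_extract_errors_and_count_v5 (error_text : String) (project_name : String) : Prop :=
  ((pvLines error_text).all
      (fun l => !pvIsCntLine l || (PySem.Int.ofStr? (pvTok l)).isSome) &&
   (match pvRep none (pvLines error_text) with
    | none => true
    | some n =>
        n - pvCntOf pvErr ((pvLines error_text).filter (fun l => !pvDrop l))
          == pvCntOf pvStart (pvKept (pvLines error_text)))) = true
instance (error_text : String) (project_name : String) : Decidable (Pre_extract_errors_and_count_v5 error_text project_name) := by unfold Pre_extract_errors_and_count_v5; infer_instance

def pvWitness_extract_errors_and_count_v5 : String × String :=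
  ("error: stray\n../dataset/a.java:1: err\n  detail\n2 errors", "proj")

def Spec_extract_errors_and_count_v5 (error_text : String) (project_name : String) (out : List String × Int) : Prop := out = extract_errors_and_count_v5_alt error_text project_name
instance (error_text : String) (project_name : String) (out : List String × Int) : Decidable (Spec_extract_errors_and_count_v5 error_text project_name out) := by unfold Spec_extract_errors_and_count_v5; infer_instance

-- ===== CLAIM (what is proved, stated in full; the proofs are below) =====
def Claim_equal_extract_errors_and_count_v5 : Prop := ∀ (error_text : String) (project_name : String), Dom_extract_errors_and_count_v5 error_text project_name → Pre_extract_errors_and_count_v5 error_text project_name → Spec_extract_errors_and_count_v5 error_text project_name (extract_errors_and_count_v5 error_text project_name)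

-- ===== LEMMAS AND PROOFS =====

-- A's forward block builder, restricted to the kept lines
def pvStepF (s : List String × List String) (l : String) : List String × List String :=
  if pvStart l then ((if s.2.isEmpty then s.1 else s.1 ++ [PySem.Str.join "\n" s.2]), [l])
  else if !s.2.isEmpty then (s.1, s.2 ++ [l])
  else s

-- the block list produced from current block c by the rest of the kept lines
def pvR : List String → List String → List String
  | [], c => if c.isEmpty then [] else [PySem.Str.join "\n" c]
  | l :: k, c =>
    if pvStart l then (if c.isEmpty then [] else [PySem.Str.join "\n" c]) ++ pvR k [l]
    else if c.isEmpty then pvR k c else pvR k (c ++ [l])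

-- B's backward assembly as a foldr over the tagged kept lines
def pvQ (k : List String) : List String × List String :=
  k.foldr (fun l st => pvStepB2 st (pvStart l, l)) ([], [])

theorem pvA_factor (lines : List String)
    (h : ∀ l ∈ lines, pvIsCntLine l = true → (PySem.Int.ofStr? (pvTok l)).isSome = true)
    (e : List String) (n : Int) (rep : Option Int) (cur : List String) (x : Int) :
    lines.foldl pvStepA (e, n, rep, cur, x, false) =
      (((pvKept lines).foldl pvStepF (e, cur)).1,
       n + pvCntOf pvStart (pvKept lines), pvRep rep lines,
       ((pvKept lines).foldl pvStepF (e, cur)).2,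
       x + pvCntOf pvErr (lines.filter (fun l => !pvDrop l)), false) := by
  induction lines generalizing e n rep cur x with
  | nil => simp [pvCntOf, pvKept, pvRep]
  | cons l rest ih =>
    have hrest : ∀ l ∈ rest, pvIsCntLine l = true → (PySem.Int.ofStr? (pvTok l)).isSome = true :=
      fun l hm => h l (by simp [hm])
    by_cases hd : pvDrop l
    · have hstep : pvStepA (e, n, rep, cur, x, false) l = (e, n, rep, cur, x, false) := by
        simp [pvStepA, hd]
      rw [List.foldl_cons, hstep, ih hrest]
      simp [pvKept, pvRep, pvIsCntLine, hd]
    · by_cases hc : pvCnt l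
      · have hcl : pvIsCntLine l = true := by simp [pvIsCntLine, hd, hc]
        obtain ⟨m, hm⟩ := Option.isSome_iff_exists.mp (h l (by simp) hcl)
        have hstep : pvStepA (e, n, rep, cur, x, false) l =
            (e, n, some m, cur, (if pvErr l then x + 1 else x), false) := by
          simp [pvStepA, hd, hc, hm]
        rw [List.foldl_cons, hstep, ih hrest]
        have hkept : pvKept (l :: rest) = pvKept rest := by simp [pvKept, hd, hc]
        have hrep : pvRep rep (l :: rest) = pvRep (some m) rest := by
          simp [pvRep, hcl, hm]
        rw [hkept, hrep]
        simp only [List.filter_cons, hd, Bool.not_false, if_pos, pvCntOf, Prod.mk.injEq,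
          true_and, and_true]
        split_ifs <;> ring
      · have hstep : pvStepA (e, n, rep, cur, x, false) l =
            ((pvStepF (e, cur) l).1, (if pvStart l then n + 1 else n), rep,
             (pvStepF (e, cur) l).2, (if pvErr l then x + 1 else x), false) := by
          simp only [pvStepA, pvStepF, hd, hc, Bool.false_eq_true, if_false]
          split_ifs <;> rfl
        rw [List.foldl_cons, hstep, ih hrest]
        have hkept : pvKept (l :: rest) = l :: pvKept rest := by simp [pvKept, hd, hc]
        have hrep : pvRep rep (l :: rest) = pvRep rep rest := by
          simp [pvRep, pvIsCntLine, hd, hc]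
        rw [hkept, hrep]
        simp only [List.filter_cons, hd, Bool.not_false, if_pos, List.foldl_cons, pvCntOf,
          Prod.mk.injEq, true_and, and_true]
        constructor <;> (split_ifs <;> ring)

theorem pvA_finalize (k : List String) (e c : List String) :
    (k.foldl pvStepF (e, c)).1 ++
      (if (k.foldl pvStepF (e, c)).2.isEmpty then []
       else [PySem.Str.join "\n" (k.foldl pvStepF (e, c)).2]) = e ++ pvR k c := by
  induction k generalizing e c with
  | nil => by_cases hc : c.isEmpty <;> simp [pvR, hc]
  | cons l k ih =>
    rw [List.foldl_cons]
    by_cases hs : pvStart l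
    · by_cases hc : c.isEmpty
      · rw [show pvStepF (e, c) l = (e, [l]) by simp [pvStepF, hs, hc]]
        rw [ih e [l]]
        simp [pvR, hs, hc]
      · rw [show pvStepF (e, c) l = (e ++ [PySem.Str.join "\n" c], [l]) by
          simp [pvStepF, hs, hc]]
        rw [ih (e ++ [PySem.Str.join "\n" c]) [l]]
        simp [pvR, hs, hc, List.append_assoc]
    · by_cases hc : c.isEmpty
      · rw [show pvStepF (e, c) l = (e, c) by simp [pvStepF, hs, hc]]
        rw [ih e c]
        simp [pvR, hs, hc]
      · rw [show pvStepF (e, c) l = (e, c ++ [l]) by simp [pvStepF, hs, hc]]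
        rw [ih e (c ++ [l])]
        simp [pvR, hs, hc]

theorem pvB1_factor (lines : List String)
    (h : ∀ l ∈ lines, pvIsCntLine l = true → (PySem.Int.ofStr? (pvTok l)).isSome = true)
    (kept : List (Bool × String)) (x : Int) (rep : Option Int) :
    lines.foldl pvStepB1 (kept, x, rep, false) =
      (kept ++ (pvKept lines).map (fun l => (pvStart l, l)),
       x + pvCntOf pvErr (lines.filter (fun l => !pvDrop l)), pvRep rep lines, false) := by
  induction lines generalizing kept x rep with
  | nil => simp [pvCntOf, pvKept, pvRep]
  | cons l rest ih =>
    have hrest : ∀ l ∈ rest, pvIsCntLine l = true → (PySem.Int.ofStr? (pvTok l)).isSome = true :=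
      fun l hm => h l (by simp [hm])
    by_cases hd : pvDrop l
    · have hstep : pvStepB1 (kept, x, rep, false) l = (kept, x, rep, false) := by
        simp [pvStepB1, hd]
      rw [List.foldl_cons, hstep, ih hrest]
      simp [pvKept, pvRep, pvIsCntLine, hd]
    · by_cases hc : pvCnt l
      · have hcl : pvIsCntLine l = true := by simp [pvIsCntLine, hd, hc]
        obtain ⟨m, hm⟩ := Option.isSome_iff_exists.mp (h l (by simp) hcl)
        have hstep : pvStepB1 (kept, x, rep, false) l =
            (kept, (if pvErr l then x + 1 else x), some m, false) := by
          simp [pvStepB1, hd, hc, hm]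
        rw [List.foldl_cons, hstep, ih hrest]
        have hkept : pvKept (l :: rest) = pvKept rest := by simp [pvKept, hd, hc]
        have hrep : pvRep rep (l :: rest) = pvRep (some m) rest := by
          simp [pvRep, hcl, hm]
        rw [hkept, hrep]
        simp only [List.filter_cons, hd, Bool.not_false, if_pos, pvCntOf, Prod.mk.injEq,
          true_and, and_true]
        split_ifs <;> ring
      · have hstep : pvStepB1 (kept, x, rep, false) l =
            (kept ++ [(pvStart l, l)], (if pvErr l then x + 1 else x), rep, false) := by
          simp only [pvStepB1, hd, hc, Bool.false_eq_true, if_false]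
        rw [List.foldl_cons, hstep, ih hrest]
        have hkept : pvKept (l :: rest) = l :: pvKept rest := by simp [pvKept, hd, hc]
        have hrep : pvRep rep (l :: rest) = pvRep rep rest := by
          simp [pvRep, pvIsCntLine, hd, hc]
        rw [hkept, hrep]
        simp only [List.filter_cons, hd, Bool.not_false, if_pos, List.map_cons, pvCntOf,
          List.append_assoc, List.singleton_append, Prod.mk.injEq, true_and, and_true]
        split_ifs <;> ring

theorem pvQ_cons (l : String) (k : List String) :
    pvQ (l :: k) = pvStepB2 (pvQ k) (pvStart l, l) := rfl

theorem pvR_nonempty (k : List String) (c : List String) (hc : ¬ c.isEmpty) :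
    pvR k c = PySem.Str.join "\n" (c ++ (pvQ k).2) :: (pvQ k).1 := by
  induction k generalizing c with
  | nil => simp [pvR, pvQ, hc]
  | cons l k ih =>
    rw [pvQ_cons]
    by_cases hs : pvStart l
    · rw [show pvR (l :: k) c = [PySem.Str.join "\n" c] ++ pvR k [l] by
        simp [pvR, hs, hc]]
      rw [ih [l] (by simp)]
      simp [pvStepB2, hs]
    · rw [show pvR (l :: k) c = pvR k (c ++ [l]) by simp [pvR, hs, hc]]
      rw [ih (c ++ [l]) (by simp)]
      simp [pvStepB2, hs, List.append_assoc]

theorem pvR_nil_eq (k : List String) : pvR k [] = (pvQ k).1 := by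
  induction k with
  | nil => simp [pvR, pvQ]
  | cons l k ih =>
    rw [pvQ_cons]
    by_cases hs : pvStart l
    · simp [pvR, hs, pvStepB2, pvR_nonempty k [l] (by simp)]
    · simp [pvR, hs, pvStepB2, ih]

theorem pvQ_length (k : List String) : ((pvQ k).1.length : Int) = pvCntOf pvStart k := by
  induction k with
  | nil => simp [pvQ, pvCntOf]
  | cons l k ih =>
    rw [pvQ_cons]
    by_cases hs : pvStart l <;> (simp [pvStepB2, hs, pvCntOf, ih]; try ring)

theorem pvB2_eq_pvQ (k : List String) :
    ((k.map (fun l => (pvStart l, l))).reverse.foldl pvStepB2 ([], [])) = pvQ k := by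
  rw [List.foldl_reverse, List.foldr_map]
  rfl

-- the common final step of both ports: with equal error lists and counts, the
-- reported-count check and the returned pair coincide
theorem pvTail (rep : Option Int) (e1 e2 : List String) (c1 c2 exc : Int)
    (he : e1 = e2) (hc : c1 = c2) :
    (match rep with
     | some n => if n - exc = c1 then (e1, c1) else (([] : List String), (0 : Int))
     | none => (e1, c1)) =
    (match rep with
     | some n => if n - exc = c2 then (e2, c2) else (([] : List String), (0 : Int))
     | none => (e2, c2)) := by
  subst he; subst hc; rfl

-- ===== VERDICT (by name: the statement is the Claim_ definition above) =====
set_option maxHeartbeats 1000000 in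
theorem extract_errors_and_count_v5_spec : Claim_equal_extract_errors_and_count_v5 := by
  intro error_text project_name _ hPre
  unfold Pre_extract_errors_and_count_v5 at hPre
  rw [Bool.and_eq_true] at hPre
  obtain ⟨hParseB, hMatchB⟩ := hPre
  have hParse : ∀ l ∈ pvLines error_text, pvIsCntLine l = true →
      (PySem.Int.ofStr? (pvTok l)).isSome = true := by
    intro l hl hc
    have := List.all_eq_true.mp hParseB l hl
    simpa [hc] using this
  unfold Spec_extract_errors_and_count_v5
  unfold extract_errors_and_count_v5 extract_errors_and_count_v5_alt
  rw [pvA_factor (pvLines error_text) hParse [] 0 none [] 0,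
      pvB1_factor (pvLines error_text) hParse [] 0 none]
  simp only [List.nil_append, zero_add]
  rw [pvB2_eq_pvQ]
  have hfin := pvA_finalize (pvKept (pvLines error_text)) [] []
  simp only [List.nil_append] at hfin
  have herr : ((pvKept (pvLines error_text)).foldl pvStepF ([], [])).1 ++
      (if ((pvKept (pvLines error_text)).foldl pvStepF ([], [])).2.isEmpty then []
       else [PySem.Str.join "\n" ((pvKept (pvLines error_text)).foldl pvStepF ([], [])).2]) =
      (pvQ (pvKept (pvLines error_text))).1 := by
    rw [hfin, pvR_nil_eq]
  simp only [Bool.false_eq_true, if_false]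
  have hQL : ((pvQ (pvKept (pvLines error_text))).1.length : Int) =
      pvCntOf pvStart (pvKept (pvLines error_text)) := pvQ_length _
  have h1 : (if ((pvKept (pvLines error_text)).foldl pvStepF ([], [])).2.isEmpty then
        ((pvKept (pvLines error_text)).foldl pvStepF ([], [])).1
      else ((pvKept (pvLines error_text)).foldl pvStepF ([], [])).1 ++
        [PySem.Str.join "\n" ((pvKept (pvLines error_text)).foldl pvStepF ([], [])).2]) =
      (pvQ (pvKept (pvLines error_text))).1 := by
    rw [← herr]; split_ifs <;> simp
  exact pvTail (pvRep none (pvLines error_text)) _ _ _ _ _ h1 hQL.symm
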